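-- pv_equiv track=rewrite | github.com/cltl/wsd-dynamic-sense-vector | label_propagation.py | _convert_sense_ids
-- ===== SOURCE A (Python) =====
-- def _convert_sense_ids(data):
--     data2 = dict((lemma, []) for lemma in data)
--     str2id = {}
--     ids = []
--     for lemma in data:
--         for sense_id, sentence_tokens, target_index in data[lemma]:
--             if sense_id is None:
--                 sense_id = -1
--             else:
--                 if sense_id not in str2id:
--                     str2id[sense_id] = len(str2id)
--                     ids.append(sense_id)
--                 sense_id = str2id[sense_id]
--             data2[lemma].append((sense_id, sentence_tokens, target_index))
--     return data2, ids
-- ===== SOURCE B (Python) =====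
-- def _convert_sense_ids(data):
--     # Pass 1: build the interning table over all sense ids in global order.
--     str2id = {}
--     ids = []
--     for entries in data.values():
--         for sense_id, _tokens, _index in entries:
--             if sense_id is not None and sense_id not in str2id:
--                 str2id[sense_id] = len(str2id)
--                 ids.append(sense_id)
--     # Pass 2: rebuild the data with interned ids (None -> -1).
--     data2 = {lemma: [(-1 if s is None else str2id[s], toks, ti)
--                      for s, toks, ti in entries]
--              for lemma, entries in data.items()}
--     return data2, ids
-- ===== Notes on version B (the rewrite author's own statement) =====
-- stated objective: alternative
-- what changed: Replaces A's single pass that interleaves interning and output construction with two passes: a first pass builds the complete sense-id interning table (str2id/ids), then a second pass rebuilds the data by pure lookup; A's repeated dict lookups via data[lemma] disappear in favour of iterating values()/items() directly.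
import Mathlib
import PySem

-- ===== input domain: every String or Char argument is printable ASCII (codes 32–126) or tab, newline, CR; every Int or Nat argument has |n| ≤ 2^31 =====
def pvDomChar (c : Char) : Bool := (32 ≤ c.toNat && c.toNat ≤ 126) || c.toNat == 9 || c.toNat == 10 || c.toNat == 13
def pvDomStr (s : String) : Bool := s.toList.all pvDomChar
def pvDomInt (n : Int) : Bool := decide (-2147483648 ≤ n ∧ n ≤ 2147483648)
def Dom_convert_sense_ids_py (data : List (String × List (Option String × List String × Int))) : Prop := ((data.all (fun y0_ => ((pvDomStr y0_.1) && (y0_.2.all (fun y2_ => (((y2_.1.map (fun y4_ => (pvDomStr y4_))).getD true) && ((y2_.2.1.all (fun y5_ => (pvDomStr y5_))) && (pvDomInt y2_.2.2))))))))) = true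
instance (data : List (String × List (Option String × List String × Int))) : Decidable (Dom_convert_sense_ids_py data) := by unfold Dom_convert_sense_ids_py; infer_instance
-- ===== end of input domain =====

-- B replaces A's single interleaved pass by two passes: first build the complete sense-id
-- interning table, then rebuild the data by pure lookup. Same output (objective: alternative).

-- ===== PORT A =====
-- A's inner loop body: one (sense_id, sentence_tokens, target_index) step on state (data2, str2id, ids)
def pvAInner (lm : String)
    (st : PySem.Dict String (List (Int × List String × Int)) × PySem.Dict String Int × List String)
    (e : Option String × List String × Int) :
    PySem.Dict String (List (Int × List String × Int)) × PySem.Dict String Int × List String :=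
  match e.1 with
  | none => (st.1.modify lm [] (· ++ [((-1 : Int), e.2.1, e.2.2)]), st.2.1, st.2.2)
  | some s =>
    let p : PySem.Dict String Int × List String :=
      if st.2.1.contains s then (st.2.1, st.2.2)
      else (st.2.1.insert s (st.2.1.size : Int), st.2.2 ++ [s])
    (st.1.modify lm [] (· ++ [(p.1.getD s 0, e.2.1, e.2.2)]), p.1, p.2)

def convert_sense_ids_py (data : List (String × List (Option String × List String × Int))) : (List (String × List (Int × List String × Int))) × List String :=
  let keys := data.map Prod.fst
  -- data2 = dict((lemma, []) for lemma in data)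
  let data2 : PySem.Dict String (List (Int × List String × Int)) :=
    keys.foldl (fun d k => d.insert k []) PySem.Dict.empty
  let dd : PySem.Dict String (List (Option String × List String × Int)) := PySem.Dict.ofList data
  let st := keys.foldl (fun st lm => (dd.getD lm []).foldl (pvAInner lm) st)
    (data2, PySem.Dict.empty, ([] : List String))
  (st.1.items, st.2.2)

-- ===== PORT B =====
-- B's pass-1 body: intern one sense id into (str2id, ids)
def pvInternStep (st : PySem.Dict String Int × List String)
    (e : Option String × List String × Int) : PySem.Dict String Int × List String :=
  match e.1 with
  | none => st
  | some s => if st.1.contains s then st else (st.1.insert s (st.1.size : Int), st.2 ++ [s])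

-- B's pass-2 element: (-1 if s is None else str2id[s], toks, ti)
def pvLookup (t : PySem.Dict String Int) (e : Option String × List String × Int) : Int × List String × Int :=
  ((match e.1 with
    | none => (-1 : Int)
    | some s => t.getD s (-1)), e.2.1, e.2.2)

def convert_sense_ids_py_alt (data : List (String × List (Option String × List String × Int))) : (List (String × List (Int × List String × Int))) × List String :=
  let st := data.foldl (fun st p => p.2.foldl pvInternStep st) (PySem.Dict.empty, ([] : List String))
  -- dict comprehension over data.items(): the keys are data's keys, in order
  let data2 := data.map (fun p => (p.1, p.2.map (pvLookup st.1)))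
  (data2, st.2)

-- ===== PRECONDITION & SPEC =====
-- Pre_ excludes association lists with duplicate lemma keys: they do not represent any Python
-- input at all (A's argument is a dict, whose keys are necessarily distinct).
def Pre_convert_sense_ids_py (data : List (String × List (Option String × List String × Int))) : Prop :=
  (data.map Prod.fst).Nodup
instance (data : List (String × List (Option String × List String × Int))) : Decidable (Pre_convert_sense_ids_py data) := by unfold Pre_convert_sense_ids_py; infer_instance

def pvWitness_convert_sense_ids_py : (List (String × List (Option String × List String × Int))) :=
  [("cat", [(some "s1", ["a", "b"], 0), (none, ["c"], 1), (some "s1", [], 2)]), ("dog", [(some "s2", [], 0)]), ("ant", [])]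

def Spec_convert_sense_ids_py (data : List (String × List (Option String × List String × Int))) (out : (List (String × List (Int × List String × Int))) × List String) : Prop := out = convert_sense_ids_py_alt data
instance (data : List (String × List (Option String × List String × Int))) (out : (List (String × List (Int × List String × Int))) × List String) : Decidable (Spec_convert_sense_ids_py data out) := by
  unfold Spec_convert_sense_ids_py
  exact @instDecidableEqProd _ _ (@instDecidableEqList _ inferInstance) inferInstance out (convert_sense_ids_py_alt data)

-- ===== CLAIM (what is proved, stated in full; the proofs are below) =====
def Claim_equal_convert_sense_ids_py : Prop := ∀ (data : List (String × List (Option String × List String × Int))), Dom_convert_sense_ids_py data → Pre_convert_sense_ids_py data → Spec_convert_sense_ids_py data (convert_sense_ids_py data)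

-- ===== LEMMAS AND PROOFS =====

-- Reference model: interning as a plain list of first occurrences.
def pvIntern1 (ids : List String) (s : Option String) : List String :=
  match s with
  | none => ids
  | some s => if s ∈ ids then ids else ids ++ [s]

def pvInternEs (es : List (Option String × List String × Int)) (ids : List String) : List String :=
  es.foldl (fun ids e => pvIntern1 ids e.1) ids

def pvInternData (ds : List (String × List (Option String × List String × Int))) (ids : List String) : List String :=
  ds.foldl (fun ids p => pvInternEs p.2 ids) ids

def pvTable (ids : List String) : PySem.Dict String Int :=
  ids.foldl (fun d s => d.insert s (d.size : Int)) PySem.Dict.empty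

-- A's per-lemma output list, with the evolving intern state made explicit
def pvConvA : List (Option String × List String × Int) → List String → List (Int × List String × Int)
  | [], _ => []
  | e :: es, ids =>
    ((match e.1 with
      | none => (-1 : Int)
      | some s => (((pvIntern1 ids e.1).idxOf s : Nat) : Int)), e.2.1, e.2.2) :: pvConvA es (pvIntern1 ids e.1)

-- what A appends to data2[k], over the whole outer loop
def pvConvOuter : List (String × List (Option String × List String × Int)) → List String → String → List (Int × List String × Int)
  | [], _, _ => []
  | p :: ds, ids, k =>
    (if k = p.1 then pvConvA p.2 ids else []) ++ pvConvOuter ds (pvInternEs p.2 ids) k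

theorem pv_nodup_intern1 (ids : List String) (s : Option String) (h : ids.Nodup) : (pvIntern1 ids s).Nodup := by
  cases s with
  | none => simpa [pvIntern1] using h
  | some s =>
    by_cases hm : s ∈ ids
    · simpa [pvIntern1, hm] using h
    · simp [pvIntern1, hm, List.nodup_append, h]
      exact fun a ha has => hm (has ▸ ha)

theorem pv_prefix_intern1 (ids : List String) (s : Option String) : ids <+: pvIntern1 ids s := by
  cases s with
  | none => exact List.prefix_rfl
  | some s =>
    simp only [pvIntern1]
    split_ifs
    · exact List.prefix_rfl
    · exact List.prefix_append _ _

theorem pv_nodup_internEs (es : List (Option String × List String × Int)) (ids : List String) (h : ids.Nodup) : (pvInternEs es ids).Nodup := by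
  induction es generalizing ids with
  | nil => exact h
  | cons e es ih => exact ih _ (pv_nodup_intern1 _ _ h)

theorem pv_prefix_internEs (es : List (Option String × List String × Int)) (ids : List String) : ids <+: pvInternEs es ids := by
  induction es generalizing ids with
  | nil => exact List.prefix_rfl
  | cons e es ih => exact (pv_prefix_intern1 ids e.1).trans (ih _)

theorem pv_nodup_internData (ds : List (String × List (Option String × List String × Int))) (ids : List String) (h : ids.Nodup) : (pvInternData ds ids).Nodup := by
  induction ds generalizing ids with
  | nil => exact h
  | cons p ds ih => exact ih _ (pv_nodup_internEs _ _ h)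

theorem pv_prefix_internData (ds : List (String × List (Option String × List String × Int))) (ids : List String) : ids <+: pvInternData ds ids := by
  induction ds generalizing ids with
  | nil => exact List.prefix_rfl
  | cons p ds ih => exact (pv_prefix_internEs p.2 ids).trans (ih _)

theorem pv_idxOf_prefix (ids ids2 : List String) (s : String) (hp : ids <+: ids2) (hm : s ∈ ids) : ids2.idxOf s = ids.idxOf s := by
  obtain ⟨t, rfl⟩ := hp
  rw [List.idxOf_append, if_pos hm]

theorem pv_contains_table (ids : List String) (s : String) : (pvTable ids).contains s = decide (s ∈ ids) := by
  unfold pvTable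
  rw [PySem.Dict.contains_eq_decide_mem_keys, PySem.Dict.keys_foldl_insert, decide_eq_decide]
  rw [PySem.Dict.keys_empty (κ := String) (ν := Int)]
  rw [PySem.Set.mem_update]
  simp

theorem pv_table_snoc (ids : List String) (s : String) : pvTable (ids ++ [s]) = (pvTable ids).insert s ((pvTable ids).size : Int) := by
  simp [pvTable, List.foldl_append]

theorem pv_size_table (ids : List String) (h : ids.Nodup) : (pvTable ids).size = ids.length := by
  induction ids using List.reverseRecOn with
  | nil => rfl
  | append_singleton ids s ih =>
    obtain ⟨h1, _, hd⟩ := List.nodup_append.mp h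
    have hni : s ∉ ids := fun hin => hd s hin s (by simp) rfl
    rw [pv_table_snoc, PySem.Dict.size_insert]
    rw [pv_contains_table]
    simp [hni, ih h1]

theorem pv_getD_table (ids : List String) (s : String) (d0 : Int) (h : ids.Nodup) (hm : s ∈ ids) : (pvTable ids).getD s d0 = ((ids.idxOf s : Nat) : Int) := by
  induction ids using List.reverseRecOn with
  | nil => simp at hm
  | append_singleton ids s' ih =>
    obtain ⟨h1, _, hd⟩ := List.nodup_append.mp h
    rw [pv_table_snoc, PySem.Dict.getD_insert]
    by_cases hss : s = s'
    · subst hss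
      have hni : s ∉ ids := fun hin => hd s hin s (by simp) rfl
      rw [if_pos rfl, pv_size_table ids h1, List.idxOf_append, if_neg hni]
      simp
    · have hmi : s ∈ ids := by
        rcases List.mem_append.mp hm with h' | h'
        · exact h'
        · simp at h'; exact absurd h' hss
      rw [if_neg hss, ih h1 hmi, List.idxOf_append, if_pos hmi]

-- B's pass 1 computes exactly (pvTable, intern list)
theorem pvB_inner (es : List (Option String × List String × Int)) (ids : List String) (h : ids.Nodup) :
    es.foldl pvInternStep (pvTable ids, ids) = (pvTable (pvInternEs es ids), pvInternEs es ids) := by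
  induction es generalizing ids with
  | nil => rfl
  | cons e es ih =>
    have hstep : pvInternStep (pvTable ids, ids) e = (pvTable (pvIntern1 ids e.1), pvIntern1 ids e.1) := by
      obtain ⟨s, t, i⟩ := e
      cases s with
      | none => rfl
      | some s =>
        simp only [pvInternStep, pvIntern1, pv_contains_table]
        by_cases hm : s ∈ ids
        · simp [hm]
        · simp [hm, pv_table_snoc]
    calc (e :: es).foldl pvInternStep (pvTable ids, ids)
        = es.foldl pvInternStep (pvTable (pvIntern1 ids e.1), pvIntern1 ids e.1) := by
          rw [List.foldl_cons, hstep]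
      _ = _ := ih _ (pv_nodup_intern1 _ _ h)

theorem pvB_fold (ds : List (String × List (Option String × List String × Int))) (ids : List String) (h : ids.Nodup) :
    ds.foldl (fun st p => p.2.foldl pvInternStep st) (pvTable ids, ids)
      = (pvTable (pvInternData ds ids), pvInternData ds ids) := by
  induction ds generalizing ids with
  | nil => rfl
  | cons p ds ih =>
    rw [List.foldl_cons, pvB_inner p.2 ids h]
    exact ih _ (pv_nodup_internEs _ _ h)

-- effect of A's repeated appends on data2
theorem pv_modify_fold (vs : List (Int × List String × Int)) (lm k : String)
    (d2 : PySem.Dict String (List (Int × List String × Int))) :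
    (vs.foldl (fun d v => d.modify lm [] (· ++ [v])) d2).getD k []
      = d2.getD k [] ++ (if k = lm then vs else []) := by
  induction vs generalizing d2 with
  | nil => simp
  | cons v vs ih =>
    rw [List.foldl_cons, ih, PySem.Dict.getD_modify]
    split_ifs with h1 <;> simp [h1]

theorem pv_modify_fold_keys (vs : List (Int × List String × Int)) (lm : String)
    (d2 : PySem.Dict String (List (Int × List String × Int))) (hc : d2.contains lm = true) :
    (vs.foldl (fun d v => d.modify lm [] (· ++ [v])) d2).keys = d2.keys := by
  induction vs generalizing d2 with
  | nil => rfl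
  | cons v vs ih =>
    rw [List.foldl_cons]
    have hk : (d2.modify lm [] (· ++ [v])).keys = d2.keys := by
      rw [PySem.Dict.keys_modify, PySem.Dict.keys_insert_of_contains _ _ hc]
    have hc' : (d2.modify lm [] (· ++ [v])).contains lm = true := by
      rw [PySem.Dict.contains_iff_mem_keys, hk, ← PySem.Dict.contains_iff_mem_keys]
      exact hc
    rw [ih _ hc', hk]

-- A's inner loop, characterised
theorem pvA_inner (es : List (Option String × List String × Int)) (lm : String)
    (d2 : PySem.Dict String (List (Int × List String × Int))) (ids : List String) (h : ids.Nodup) :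
    es.foldl (pvAInner lm) (d2, pvTable ids, ids)
      = ((pvConvA es ids).foldl (fun d v => d.modify lm [] (· ++ [v])) d2,
         pvTable (pvInternEs es ids), pvInternEs es ids) := by
  induction es generalizing d2 ids with
  | nil => rfl
  | cons e es ih =>
    have hstep : pvAInner lm (d2, pvTable ids, ids) e
        = (d2.modify lm [] (· ++ [((match e.1 with
            | none => (-1 : Int)
            | some s => (((pvIntern1 ids e.1).idxOf s : Nat) : Int)), e.2.1, e.2.2)]),
           pvTable (pvIntern1 ids e.1), pvIntern1 ids e.1) := by
      obtain ⟨s, t, i⟩ := e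
      cases s with
      | none => rfl
      | some s =>
        simp only [pvAInner, pvIntern1, pv_contains_table]
        by_cases hm : s ∈ ids
        · simp only [hm, decide_true, if_true]
          rw [pv_getD_table ids s 0 h hm]
        · have hsn : (ids ++ [s]).Nodup := by
            simp [List.nodup_append, h]
            exact fun a ha has => hm (has ▸ ha)
          simp only [hm, decide_false, if_false, ← pv_table_snoc, Bool.false_eq_true]
          rw [pv_getD_table (ids ++ [s]) s 0 hsn (by simp)]
    rw [List.foldl_cons, hstep, ih _ _ (pv_nodup_intern1 _ _ h)]
    rfl

theorem pv_convOuter_nil (ds : List (String × List (Option String × List String × Int))) (ids : List String) (k : String)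
    (h : k ∉ ds.map Prod.fst) : pvConvOuter ds ids k = [] := by
  induction ds generalizing ids with
  | nil => rfl
  | cons p ds ih =>
    simp only [List.map_cons, List.mem_cons, not_or] at h
    simp [pvConvOuter, h.1, ih _ h.2]

-- A's outer loop, characterised
theorem pvA_outer (ds : List (String × List (Option String × List String × Int)))
    (d2 : PySem.Dict String (List (Int × List String × Int))) (ids : List String)
    (h : ids.Nodup) (hc : ∀ p ∈ ds, d2.contains p.1 = true) :
    ∃ D2, ds.foldl (fun st p => p.2.foldl (pvAInner p.1) st) (d2, pvTable ids, ids)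
        = (D2, pvTable (pvInternData ds ids), pvInternData ds ids)
      ∧ D2.keys = d2.keys
      ∧ ∀ k, D2.getD k [] = d2.getD k [] ++ pvConvOuter ds ids k := by
  induction ds generalizing d2 ids with
  | nil => exact ⟨d2, rfl, rfl, fun k => by simp [pvConvOuter]⟩
  | cons p ds ih =>
    have hcp : d2.contains p.1 = true := hc p (by simp)
    set d2' := (pvConvA p.2 ids).foldl (fun d v => d.modify p.1 [] (· ++ [v])) d2 with hd2'
    have hk' : d2'.keys = d2.keys := pv_modify_fold_keys _ _ _ hcp
    have hc' : ∀ q ∈ ds, d2'.contains q.1 = true := by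
      intro q hq
      rw [PySem.Dict.contains_iff_mem_keys, hk', ← PySem.Dict.contains_iff_mem_keys]
      exact hc q (by simp [hq])
    obtain ⟨D2, hfold, hkeys, hgetD⟩ := ih d2' _ (pv_nodup_internEs p.2 ids h) hc'
    refine ⟨D2, ?_, hkeys.trans hk', ?_⟩
    · rw [List.foldl_cons, pvA_inner p.2 p.1 d2 ids h]
      exact hfold
    · intro k
      rw [hgetD k, hd2', pv_modify_fold]
      simp [pvConvOuter, List.append_assoc]

-- pvConvA agrees with the final-table lookup map
theorem pv_convA_eq (es : List (Option String × List String × Int)) (ids I : List String)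
    (h : ids.Nodup) (hI : I.Nodup) (hp : pvInternEs es ids <+: I) :
    pvConvA es ids = es.map (pvLookup (pvTable I)) := by
  induction es generalizing ids with
  | nil => rfl
  | cons e es ih =>
    have hp1 : pvIntern1 ids e.1 <+: I := (pv_prefix_internEs es _).trans hp
    have hhead : ((match e.1 with
        | none => (-1 : Int)
        | some s => (((pvIntern1 ids e.1).idxOf s : Nat) : Int)), e.2.1, e.2.2)
        = pvLookup (pvTable I) e := by
      obtain ⟨s, t, i⟩ := e
      cases s with
      | none => rfl
      | some s =>
        have hm : s ∈ pvIntern1 ids (some s) := by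
          by_cases hms : s ∈ ids <;> simp [pvIntern1, hms]
        have hmI : s ∈ I := hp1.subset hm
        simp only [pvLookup]
        rw [pv_getD_table I s (-1) hI hmI, pv_idxOf_prefix _ I s hp1 hm]
    simp only [pvConvA, List.map_cons, hhead]
    exact congrArg _ (ih _ (pv_nodup_intern1 _ _ h) hp)

theorem pv_convOuter_eq (ds : List (String × List (Option String × List String × Int))) (ids I : List String)
    (h : ids.Nodup) (hI : I.Nodup) (hp : pvInternData ds ids <+: I)
    (hk : (ds.map Prod.fst).Nodup) :
    ∀ p ∈ ds, pvConvOuter ds ids p.1 = p.2.map (pvLookup (pvTable I)) := by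
  induction ds generalizing ids with
  | nil => intro p hp'; simp at hp'
  | cons q ds ih =>
    intro p hp'
    simp only [List.map_cons, List.nodup_cons] at hk
    rcases List.mem_cons.mp hp' with rfl | hmem
    · simp only [pvConvOuter]
      rw [pv_convOuter_nil ds _ p.1 hk.1]
      rw [pv_convA_eq p.2 ids I h hI ((pv_prefix_internData ds _).trans hp)]
      simp
    · have hne : p.1 ≠ q.1 := by
        intro heq
        exact hk.1 (heq ▸ List.mem_map_of_mem hmem)
      simp only [pvConvOuter, if_neg hne, List.nil_append]
      exact ih _ (pv_nodup_internEs _ _ h) hp hk.2 p hmem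

-- ===== VERDICT (by name: the statement is the Claim_ definition above) =====
theorem convert_sense_ids_py_spec : Claim_equal_convert_sense_ids_py := by
  intro data _ hpre
  unfold Pre_convert_sense_ids_py at hpre
  unfold Spec_convert_sense_ids_py convert_sense_ids_py convert_sense_ids_py_alt
  dsimp only
  -- name the final intern list
  set I := pvInternData data [] with hI
  have hInodup : I.Nodup := pv_nodup_internData data [] (by simp)
  -- B's pass 1
  have hB : data.foldl (fun st p => p.2.foldl pvInternStep st) (PySem.Dict.empty, ([] : List String))
      = (pvTable I, I) := pvB_fold data [] (by simp)
  -- A's lookup data[lemma] is the pair's own list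
  have hitems : (PySem.Dict.ofList data).items = data := by
    have hof : PySem.Dict.ofList data = data.foldl (fun d p => d.insert p.1 p.2) PySem.Dict.empty := rfl
    rw [hof]
    have := PySem.Dict.items_foldl_insert_fresh data Prod.fst Prod.snd PySem.Dict.empty
      (fun a _ => PySem.Dict.contains_empty _) hpre
    simpa using this
  have hgetOf : ∀ p ∈ data, (PySem.Dict.ofList data).getD p.1 [] = p.2 := by
    intro p hp
    exact PySem.Dict.getD_of_mem_items _ (by rw [hitems]; exact hp) (PySem.Dict.nodup_keys_ofList data) []
  -- A's outer loop over keys with lookup = loop over the pairs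
  have hA0 : ∀ st, (data.map Prod.fst).foldl
        (fun st lm => ((PySem.Dict.ofList data).getD lm []).foldl (pvAInner lm) st) st
      = data.foldl (fun st p => p.2.foldl (pvAInner p.1) st) st := by
    intro st
    rw [List.foldl_map]
    exact PySem.List.foldl_congr_mem _ _ _ _ (fun acc p hp => by rw [hgetOf p hp])
  -- the initial data2 dict
  set d20 := (data.map Prod.fst).foldl (fun d k => d.insert k ([] : List (Int × List String × Int))) PySem.Dict.empty with hd20
  have hitems0 : d20.items = (data.map Prod.fst).map (fun k => (k, ([] : List (Int × List String × Int)))) := by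
    have := PySem.Dict.items_foldl_insert_fresh (data.map Prod.fst) (fun a => a)
      (fun _ => ([] : List (Int × List String × Int))) PySem.Dict.empty
      (fun a _ => PySem.Dict.contains_empty _) (by simpa using hpre)
    simpa using this
  have hkeys0 : d20.keys = data.map Prod.fst := by
    simp only [PySem.Dict.keys, hitems0, List.map_map]
    simp
  have hnk0 : d20.keys.Nodup := by rw [hkeys0]; exact hpre
  have hc0 : ∀ p ∈ data, d20.contains p.1 = true := by
    intro p hp
    rw [PySem.Dict.contains_iff_mem_keys, hkeys0]
    exact List.mem_map_of_mem hp
  have hg0 : ∀ p ∈ data, d20.getD p.1 [] = [] := by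
    intro p hp
    exact PySem.Dict.getD_of_mem_items _ (by rw [hitems0]; exact List.mem_map_of_mem (List.mem_map_of_mem hp)) hnk0 []
  -- A's loop, characterised
  obtain ⟨D2, hfold, hkeysD, hgetD⟩ := pvA_outer data d20 [] (by simp) hc0
  rw [hA0, hB]
  have hTable0 : (PySem.Dict.empty : PySem.Dict String Int) = pvTable [] := rfl
  rw [hTable0, hfold]
  -- compare the two components
  refine Prod.ext ?_ rfl
  have hDkeys : D2.keys = data.map Prod.fst := hkeysD.trans hkeys0
  have hDnodup : D2.keys.Nodup := by rw [hDkeys]; exact hpre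
  rw [PySem.Dict.items_eq_map_keys D2 hDnodup [], hDkeys, List.map_map]
  apply List.map_congr_left
  intro p hp
  have : D2.getD p.1 [] = pvConvOuter data [] p.1 := by
    rw [hgetD p.1, hg0 p hp, List.nil_append]
  simp only [Function.comp_apply, this]
  exact congrArg _ (pv_convOuter_eq data [] I (by simp) hInodup List.prefix_rfl hpre p hp)
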